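-- pv_equiv track=rewrite | github.com/rteehas/few_shot_word_learning | pile_reranking.py | get_word_idx
-- ===== SOURCE A (Python) =====
-- def get_word_idx(sent, word):
--     try:
--         return sent.split(" ").index(word)
--     except ValueError:
--         split = sent.split(" ")
--         for i, x in enumerate(split):
--             if word in x:
--                 return i
-- ===== SOURCE B (Python) =====
-- def get_word_idx(sent, word):
--     fallback = None
--     for i, x in enumerate(sent.split(" ")):
--         if x == word:
--             return i
--         if fallback is None and word in x:
--             fallback = i
--     return fallback
-- ===== Notes on version B (the rewrite author's own statement) =====
-- stated objective: simpler
-- what changed: B merges A's try/.index() exact-match scan and the separate substring fallback loop into one enumerate pass that returns immediately on an exact match and remembers the first substring hit in a fallback variable returned after the loop.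
import Mathlib
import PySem

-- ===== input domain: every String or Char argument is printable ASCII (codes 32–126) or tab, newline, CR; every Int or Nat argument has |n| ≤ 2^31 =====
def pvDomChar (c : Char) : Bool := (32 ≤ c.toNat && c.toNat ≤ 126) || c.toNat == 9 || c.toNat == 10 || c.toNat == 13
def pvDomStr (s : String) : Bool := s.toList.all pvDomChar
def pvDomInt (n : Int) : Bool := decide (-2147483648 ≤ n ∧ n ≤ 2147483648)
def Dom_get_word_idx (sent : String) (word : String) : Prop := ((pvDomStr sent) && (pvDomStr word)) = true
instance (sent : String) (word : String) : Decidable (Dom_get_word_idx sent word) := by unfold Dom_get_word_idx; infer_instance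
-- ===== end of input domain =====

-- B merges A's exact-match .index() scan and its separate substring fallback loop into one enumerate pass with a fallback accumulator (simpler, same cost).


-- ===== PORT A =====
-- fallback loop of A: 'for i, x in enumerate(split): if word in x: return i'
def pvFbLoop (word : String) : List (Int × String) → Option Int
  | [] => none
  | (i, x) :: rest => if PySem.Str.isIn word x then some i else pvFbLoop word rest

def get_word_idx (sent : String) (word : String) : Option Int :=
  let split := (PySem.Str.split? sent " ").getD []   -- sep " " ≠ "", so split? is always some
  match PySem.List.index? split word with            -- try: … .index(word); ValueError = none
  | some k => some (k : Int)
  | none => pvFbLoop word (PySem.List.enumerate split)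

-- ===== PORT B =====
-- single pass: return i on exact match, record first substring hit into fallback
def pvAltLoop (word : String) : List (Int × String) → Option Int → Option Int
  | [], fb => fb
  | (i, x) :: rest, fb =>
    if x == word then some i
    else pvAltLoop word rest (if fb.isNone && PySem.Str.isIn word x then some i else fb)

def get_word_idx_alt (sent : String) (word : String) : Option Int :=
  pvAltLoop word (PySem.List.enumerate ((PySem.Str.split? sent " ").getD [])) none

-- ===== PRECONDITION & SPEC =====
def Spec_get_word_idx (sent : String) (word : String) (out : Option Int) : Prop := out = get_word_idx_alt sent word
instance (sent : String) (word : String) (out : Option Int) : Decidable (Spec_get_word_idx sent word out) := by unfold Spec_get_word_idx; infer_instance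

-- ===== CLAIM (what is proved, stated in full; the proofs are below) =====
def Claim_equal_get_word_idx : Prop := ∀ (sent : String) (word : String), Dom_get_word_idx sent word → Spec_get_word_idx sent word (get_word_idx sent word)

-- ===== LEMMAS AND PROOFS =====
-- Invariant of B's loop over an enumerated list starting at s with fallback fb:
-- an exact match wins with its absolute index; otherwise a pre-set fallback wins; otherwise A's fallback scan.
theorem pvAltLoop_eq (word : String) (l : List String) (s : Int) (fb : Option Int) :
    pvAltLoop word (PySem.List.enumerate l s) fb =
      match PySem.List.index? l word with
      | some k => some (s + (k : Int))
      | none =>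
        match fb with
        | some j => some j
        | none => pvFbLoop word (PySem.List.enumerate l s) := by
  induction l generalizing s fb with
  | nil => cases fb <;> simp [PySem.List.enumerate_nil, pvAltLoop, pvFbLoop, PySem.List.index?]
  | cons x rest ih =>
    rw [PySem.List.enumerate_cons]
    by_cases hx : x = word
    · subst hx
      rw [PySem.List.index?_cons_self]
      simp [pvAltLoop]
    · have hbeq : (x == word) = false := by simp [hx]
      rw [PySem.List.index?_cons_of_ne rest hx]
      simp only [pvAltLoop, hbeq, Bool.false_eq_true, if_false]
      rw [ih]
      cases hk : PySem.List.index? rest word with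
      | some k =>
        simp only [Option.map_some]
        cases fb <;> simp <;> ring
      | none =>
        simp only [Option.map_none]
        cases fb with
        | some j => simp
        | none =>
          by_cases hin : PySem.Chars.isIn word.toList x.toList = true <;>
            simp [PySem.Str.isIn, hin, pvFbLoop]

-- ===== VERDICT (by name: the statement is the Claim_ definition above) =====
theorem get_word_idx_spec : Claim_equal_get_word_idx := by
  intro sent word _
  unfold Spec_get_word_idx get_word_idx get_word_idx_alt
  rw [pvAltLoop_eq]
  cases hk : PySem.List.index? ((PySem.Str.split? sent " ").getD []) word with
  | none => simp only [hk]
  | some k => simp only [hk]; simp
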